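-- pv_equiv track=rewrite | github.com/sudhamhebbarbrown/AdventOfCode2024 | Day5/solution.py | build_order_map
-- ===== SOURCE A (Python) =====
-- def build_order_map(rules):
--     """
--     Build a comprehensive order map from the given rules.
--
--     Args:
--         rules (dict): A dictionary of allowed rules
--
--     Returns:
--         dict: A dictionary representing the order of elements
--     """
--     # Track direct and transitive orders
--     order = {}
--
--     # First, add all direct rules
--     for first, seconds in rules.items():
--         if first not in order:
--             order[first] = set()
--         order[first].update(seconds)
--
--     # Find all possible transitive relationships
--     changed = True
--     while changed:
--         changed = False
--         for x in list(order.keys()):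
--             for y in list(order.get(x, [])):
--                 if y in order:
--                     new_elements = order[y] - order.get(x, set())
--                     if new_elements:
--                         order[x] = order.get(x, set()).union(new_elements)
--                         changed = True
--
--     return order
-- ===== SOURCE B (Python) =====
-- def build_order_map(rules):
--     # Per-key graph search instead of A's global fixpoint sweeps: for each key,
--     # one breadth-first traversal of the direct rules collects everything
--     # reachable through chains of rule keys.
--     order = {}
--     for x in rules:
--         seen = set()
--         frontier = list(rules[x])
--         i = 0
--         while i < len(frontier):
--             y = frontier[i]
--             i += 1
--             if y not in seen:
--                 seen.add(y)
--                 if y in rules: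
--                     frontier.extend(rules[y])
--         order[x] = seen
--     return order
-- ===== Notes on version B (the rewrite author's own statement) =====
-- stated objective: faster
-- what changed: B discards A's repeated whole-map fixpoint sweeps with per-pair set differences and instead runs one breadth-first reachability search over the direct rules for each key, visiting every key and rule entry once per source.
import Mathlib
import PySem

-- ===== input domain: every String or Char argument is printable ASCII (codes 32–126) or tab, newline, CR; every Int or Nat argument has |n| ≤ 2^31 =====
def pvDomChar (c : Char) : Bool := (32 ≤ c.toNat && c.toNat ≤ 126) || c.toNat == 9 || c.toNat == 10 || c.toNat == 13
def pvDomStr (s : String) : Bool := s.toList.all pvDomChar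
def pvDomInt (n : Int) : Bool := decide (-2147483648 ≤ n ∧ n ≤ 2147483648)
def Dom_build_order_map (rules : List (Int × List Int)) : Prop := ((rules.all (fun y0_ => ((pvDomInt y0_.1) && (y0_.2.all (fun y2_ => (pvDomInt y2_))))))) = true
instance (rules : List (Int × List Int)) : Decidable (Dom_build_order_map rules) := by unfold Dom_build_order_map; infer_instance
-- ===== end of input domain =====

-- B replaces A's global fixpoint sweeps by one breadth-first reachability search
-- per key (alternative algorithm; the Python return values are dicts of sets).
-- Both ports render each returned set in sorted order: Python set iteration
-- order is not part of the value, so this canonicalization is exact on sets.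


-- shared renderer of the returned dict-of-sets (sets have no iteration order;
-- each one is listed sorted — exact as a set value)
def pvCanon (o : PySem.Dict Int (PySem.Set Int)) : List (Int × List Int) :=
  o.items.map (fun p => (p.1, PySem.List.sorted p.2 (fun z => z) false))

-- ===== PORT A =====
-- `for first, seconds in rules.items(): if first not in order: order[first] = set(); order[first].update(seconds)`
def pvInitA (d : PySem.Dict Int (List Int)) : PySem.Dict Int (PySem.Set Int) :=
  d.items.foldl (fun o p =>
    let o' := if o.contains p.1 then o else o.insert p.1 PySem.Set.empty
    o'.insert p.1 (PySem.Set.update (o'.getD p.1 PySem.Set.empty) p.2)) PySem.Dict.empty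

-- body of `for y in list(order.get(x, []))`; `new_elements` is written out twice
-- (a Lean `let` would only obscure the case split, the value is identical)
def pvStepA (x : Int) (st : PySem.Dict Int (PySem.Set Int) × Bool) (y : Int) :
    PySem.Dict Int (PySem.Set Int) × Bool :=
  if st.1.contains y then
    if (PySem.Set.diff (st.1.getD y PySem.Set.empty) (st.1.getD x PySem.Set.empty)).isEmpty then st
    else (st.1.insert x (PySem.Set.union (st.1.getD x PySem.Set.empty)
      (PySem.Set.diff (st.1.getD y PySem.Set.empty) (st.1.getD x PySem.Set.empty))), true)
  else st

-- one `for x in list(order.keys()): …` pass; the Bool is the `changed` flag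
def pvSweepA (o : PySem.Dict Int (PySem.Set Int)) : PySem.Dict Int (PySem.Set Int) × Bool :=
  o.keys.foldl (fun st x => (st.1.getD x PySem.Set.empty).foldl (pvStepA x) st) (o, false)

-- `while changed:`; the fuel argument only makes the recursion structural, it is
-- provably never exhausted at the value build_order_map passes (see the proofs)
def pvLoopA : Nat → PySem.Dict Int (PySem.Set Int) → PySem.Dict Int (PySem.Set Int)
  | 0, o => o
  | n+1, o => let p := pvSweepA o; if p.2 then pvLoopA n p.1 else p.1

def build_order_map (rules : List (Int × List Int)) : List (Int × List Int) :=
  let d := PySem.Dict.ofList rules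
  let order := pvInitA d
  pvCanon (pvLoopA (order.keys.length + 2) order)

-- ===== PORT B =====
-- termination measure of B's while loop: pending frontier entries plus the
-- rule entries of the still-unseen keys (cited by pvBfs's decreasing_by)
def pvUnseenW (d : PySem.Dict Int (List Int)) (seen : PySem.Set Int) : Nat :=
  ((d.keys.filter (fun k => !(PySem.Set.contains seen k))).map (fun k => (d.getD k []).length)).sum

theorem pv_contains_add_of (seen : PySem.Set Int) (y a : Int)
    (h : PySem.Set.contains seen a = true) :
    PySem.Set.contains (PySem.Set.add seen y) a = true := by
  rw [PySem.Set.contains_iff] at h ⊢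
  rw [PySem.Set.mem_add]; exact Or.inl h

theorem pv_contains_add_self (seen : PySem.Set Int) (y : Int) :
    PySem.Set.contains (PySem.Set.add seen y) y = true := by
  rw [PySem.Set.contains_iff, PySem.Set.mem_add]; exact Or.inr rfl

theorem pv_contains_add_ne (seen : PySem.Set Int) (y a : Int) (hne : a ≠ y) :
    PySem.Set.contains (PySem.Set.add seen y) a = PySem.Set.contains seen a := by
  by_cases h : PySem.Set.contains seen a = true
  · rw [h, pv_contains_add_of seen y a h]
  · rw [Bool.eq_false_iff.mpr h, Bool.eq_false_iff]
    intro hc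
    rw [PySem.Set.contains_iff, PySem.Set.mem_add] at hc
    rcases hc with h2 | h2
    · exact h (by rw [PySem.Set.contains_iff]; exact h2)
    · exact hne h2

theorem pv_filter_sum_le (f : Int → Nat) (seen : PySem.Set Int) (y : Int) :
    ∀ l : List Int,
      ((l.filter (fun k => !(PySem.Set.contains (PySem.Set.add seen y) k))).map f).sum
        ≤ ((l.filter (fun k => !(PySem.Set.contains seen k))).map f).sum := by
  intro l
  induction l with
  | nil => simp
  | cons a t ih =>
    by_cases ha : PySem.Set.contains seen a = true
    · rw [List.filter_cons_of_neg (by rw [pv_contains_add_of seen y a ha]; decide),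
        List.filter_cons_of_neg (by rw [ha]; decide)]
      exact ih
    · have hb : PySem.Set.contains seen a = false := Bool.eq_false_iff.mpr ha
      by_cases ha2 : PySem.Set.contains (PySem.Set.add seen y) a = true
      · rw [List.filter_cons_of_neg (by rw [ha2]; decide),
          List.filter_cons_of_pos (by rw [hb]; rfl)]
        simp only [List.map_cons, List.sum_cons]
        omega
      · rw [List.filter_cons_of_pos (by rw [Bool.eq_false_iff.mpr ha2]; rfl),
          List.filter_cons_of_pos (by rw [hb]; rfl)]
        simp only [List.map_cons, List.sum_cons]
        have := ih
        omega

theorem pv_filter_sum_add (f : Int → Nat) (seen : PySem.Set Int) (y : Int) :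
    ∀ l : List Int, y ∈ l → PySem.Set.contains seen y = false →
      ((l.filter (fun k => !(PySem.Set.contains (PySem.Set.add seen y) k))).map f).sum + f y
        ≤ ((l.filter (fun k => !(PySem.Set.contains seen k))).map f).sum := by
  intro l
  induction l with
  | nil => intro h; cases h
  | cons a t ih =>
    intro hy hns
    by_cases hay : a = y
    · subst hay
      have h1 := pv_filter_sum_le f seen a t
      rw [List.filter_cons_of_neg (by rw [pv_contains_add_self seen a]; decide),
        List.filter_cons_of_pos (by rw [hns]; rfl)]
      simp only [List.map_cons, List.sum_cons]
      omega
    · have hyt : y ∈ t := by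
        rcases List.mem_cons.mp hy with h | h
        · exact absurd h.symm hay
        · exact h
      by_cases ha : PySem.Set.contains seen a = true
      · rw [List.filter_cons_of_neg (by rw [pv_contains_add_ne seen y a hay, ha]; decide),
          List.filter_cons_of_neg (by rw [ha]; decide)]
        exact ih hyt hns
      · have hb : PySem.Set.contains seen a = false := Bool.eq_false_iff.mpr ha
        rw [List.filter_cons_of_pos (by rw [pv_contains_add_ne seen y a hay, hb]; rfl),
          List.filter_cons_of_pos (by rw [hb]; rfl)]
        simp only [List.map_cons, List.sum_cons]
        have := ih hyt hns
        omega

-- `while i < len(frontier): y = frontier[i]; i += 1; if y not in seen: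
--    seen.add(y); if y in rules: frontier.extend(rules[y])`
def pvBfs (d : PySem.Dict Int (List Int)) : List Int → PySem.Set Int → PySem.Set Int
  | [], seen => seen
  | y :: rest, seen =>
    if PySem.Set.contains seen y then pvBfs d rest seen
    else if d.contains y then pvBfs d (rest ++ d.getD y []) (PySem.Set.add seen y)
    else pvBfs d rest (PySem.Set.add seen y)
termination_by frontier seen => frontier.length + pvUnseenW d seen
decreasing_by
  · simp
  · rename_i hs hk
    have h1 : pvUnseenW d (PySem.Set.add seen y) + (d.getD y []).length ≤ pvUnseenW d seen := by
      unfold pvUnseenW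
      exact pv_filter_sum_add (fun k => (d.getD k []).length) seen y d.keys
        ((PySem.Dict.contains_iff_mem_keys d y).mp hk) (Bool.eq_false_iff.mpr hs)
    simp only [List.length_append, List.length_cons]
    omega
  · have h1 : pvUnseenW d (PySem.Set.add seen y) ≤ pvUnseenW d seen := by
      unfold pvUnseenW
      exact pv_filter_sum_le (fun k => (d.getD k []).length) seen y d.keys
    simp only [List.length_cons]
    omega

def build_order_map_alt (rules : List (Int × List Int)) : List (Int × List Int) :=
  let d := PySem.Dict.ofList rules
  let order := d.keys.foldl
    (fun o x => o.insert x (pvBfs d (d.getD x []) PySem.Set.empty)) PySem.Dict.empty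
  pvCanon order

-- ===== PRECONDITION & SPEC =====
def Spec_build_order_map (rules : List (Int × List Int)) (out : List (Int × List Int)) : Prop := out = build_order_map_alt rules
instance (rules : List (Int × List Int)) (out : List (Int × List Int)) : Decidable (Spec_build_order_map rules out) := by unfold Spec_build_order_map; infer_instance

-- ===== CLAIM (what is proved, stated in full; the proofs are below) =====
def Claim_equal_build_order_map : Prop := ∀ (rules : List (Int × List Int)), Dom_build_order_map rules → Spec_build_order_map rules (build_order_map rules)

-- ===== LEMMAS AND PROOFS =====

-- Abbreviation used by the proofs only
abbrev pvDS := PySem.Dict Int (PySem.Set Int)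

-- B's per-pair update, the proof-side reference form of A's pvStepA
def pvStepB (x : Int) (o : pvDS) (y : Int) : pvDS :=
  if o.contains y then
    o.insert x (PySem.Set.union (o.getD x PySem.Set.empty) (o.getD y PySem.Set.empty))
  else o

def pvSweepB (o : pvDS) : pvDS :=
  o.keys.foldl (fun o x => (o.getD x PySem.Set.empty).foldl (pvStepB x) o) o

-- proof-side reference form of A's initialization
def pvInitB (d : PySem.Dict Int (List Int)) : pvDS :=
  d.items.foldl (fun o p => o.insert p.1 (PySem.Set.ofList p.2)) PySem.Dict.empty

-- ---------- Set-level facts ----------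
theorem pv_union_eq_append (s t : PySem.Set Int) :
    ∃ e, PySem.Set.union s t = s ++ e := by
  exact ⟨_, PySem.Set.update_eq_append_filter s t⟩

theorem pv_foldl_add_filter (s : PySem.Set Int) (t : List Int) :
    ∀ s' : PySem.Set Int, (∀ a ∈ s, a ∈ s') →
      (t.filter (fun a => !s.contains a)).foldl PySem.Set.add s' = t.foldl PySem.Set.add s' := by
  induction t with
  | nil => intro s' _; rfl
  | cons a t ih =>
    intro s' hs
    by_cases ha : a ∈ s
    · have hc : s.contains a = true := by
        simpa [PySem.Set.contains_iff] using ha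
      rw [List.filter_cons_of_neg (by simpa using ha), List.foldl_cons,
        PySem.Set.add_of_mem (hs a ha)]
      exact ih s' hs
    · have hc : s.contains a = false := by
        simp only [PySem.Set.contains_eq_listContains]
        simpa using ha
      rw [List.filter_cons_of_pos (by simpa using ha), List.foldl_cons, List.foldl_cons]
      exact ih (PySem.Set.add s' a) (fun b hb => by
        rw [PySem.Set.mem_add]; exact Or.inl (hs b hb))

theorem pv_union_diff (s t : PySem.Set Int) :
    PySem.Set.union s (PySem.Set.diff t s) = PySem.Set.union s t := by
  show PySem.Set.update s (t.filter (fun a => !s.contains a)) = PySem.Set.update s t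
  exact pv_foldl_add_filter s t s (fun a h => h)

theorem pv_union_eq_self (s t : PySem.Set Int) (h : ∀ a ∈ t, a ∈ s) :
    PySem.Set.union s t = s := by
  show PySem.Set.update s t = s
  rw [PySem.Set.update_eq_append_filter]
  have : (PySem.Set.ofList t).filter (fun y => !s.contains y) = [] := by
    apply List.filter_eq_nil_iff.mpr
    intro a ha
    have : a ∈ t := (PySem.Set.mem_ofList t a).mp ha
    simp only [PySem.Set.contains_iff, Bool.not_eq_true', Bool.not_eq_false]
    exact h a this
  rw [this]
  simp

-- ---------- Dict basics ----------
theorem pv_insert_getD_self (o : pvDS) (x : Int)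
    (hnd : o.keys.Nodup) (hx : x ∈ o.keys) :
    o.insert x (o.getD x PySem.Set.empty) = o := by
  apply PySem.Dict.ext
  have hc : o.contains x = true := (PySem.Dict.contains_iff_mem_keys o x).mpr hx
  rw [PySem.Dict.items_insert_of_contains _ _ hc]
  conv_rhs => rw [← List.map_id o.items]
  apply List.map_congr_left
  intro p hp
  obtain ⟨pk, pv⟩ := p
  show (if (pk == x) = true then (x, PySem.Dict.getD o x PySem.Set.empty) else (pk, pv)) = id (pk, pv)
  by_cases hpx : pk = x
  · subst hpx
    simp
    exact PySem.Dict.getD_of_mem_items o hp hnd _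
  · simp [hpx]

-- ---------- the extension order on states ----------
def pvExt (a b : pvDS) : Prop :=
  a.keys = b.keys ∧ ∀ k : Int, ∃ e, b.getD k PySem.Set.empty = a.getD k PySem.Set.empty ++ e

theorem pvExt_refl (a : pvDS) : pvExt a a :=
  ⟨rfl, fun k => ⟨[], by simp⟩⟩

theorem pvExt_trans {a b c : pvDS} (h1 : pvExt a b) (h2 : pvExt b c) : pvExt a c := by
  refine ⟨h1.1.trans h2.1, fun k => ?_⟩
  obtain ⟨e1, he1⟩ := h1.2 k
  obtain ⟨e2, he2⟩ := h2.2 k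
  exact ⟨e1 ++ e2, by rw [he2, he1, List.append_assoc]⟩

theorem pvExt_mem {a b : pvDS} (h : pvExt a b) {k z : Int}
    (hz : z ∈ a.getD k PySem.Set.empty) : z ∈ b.getD k PySem.Set.empty := by
  obtain ⟨e, he⟩ := h.2 k
  rw [he]; exact List.mem_append_left _ hz

theorem pv_keys_stepB (x : Int) (o : pvDS) (y : Int) (hx : x ∈ o.keys) :
    (pvStepB x o y).keys = o.keys := by
  unfold pvStepB
  split
  · exact PySem.Dict.keys_insert_of_contains _ _ ((PySem.Dict.contains_iff_mem_keys o x).mpr hx)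
  · rfl

theorem pvExt_stepB (x : Int) (o : pvDS) (y : Int) (hx : x ∈ o.keys) :
    pvExt o (pvStepB x o y) := by
  refine ⟨(pv_keys_stepB x o y hx).symm, fun k => ?_⟩
  unfold pvStepB
  split
  · rw [PySem.Dict.getD_insert]
    by_cases hk : k = x
    · subst hk
      obtain ⟨e, he⟩ := pv_union_eq_append (o.getD k PySem.Set.empty) (o.getD y PySem.Set.empty)
      exact ⟨e, by rw [if_pos rfl]; exact he⟩
    · exact ⟨[], by rw [if_neg hk]; simp⟩
  · exact ⟨[], by simp⟩

theorem pvExt_foldl_stepB (x : Int) (l : List Int) :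
    ∀ o : pvDS, x ∈ o.keys → pvExt o (l.foldl (pvStepB x) o) := by
  induction l with
  | nil => intro o _; exact pvExt_refl o
  | cons y l ih =>
    intro o hx
    have h1 := pvExt_stepB x o y hx
    have hx1 : x ∈ (pvStepB x o y).keys := h1.1 ▸ hx
    exact pvExt_trans h1 (ih _ hx1)

theorem pvExt_sweepB_fold (xs : List Int) :
    ∀ o : pvDS, (∀ x ∈ xs, x ∈ o.keys) →
      pvExt o (xs.foldl (fun o x => (o.getD x PySem.Set.empty).foldl (pvStepB x) o) o) := by
  induction xs with
  | nil => intro o _; exact pvExt_refl o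
  | cons x xs ih =>
    intro o hxs
    have hx : x ∈ o.keys := hxs x (List.mem_cons_self)
    have h1 := pvExt_foldl_stepB x (o.getD x PySem.Set.empty) o hx
    refine pvExt_trans h1 (ih _ ?_)
    intro a ha
    exact h1.1 ▸ hxs a (List.mem_cons_of_mem _ ha)

theorem pvExt_sweepB (o : pvDS) : pvExt o (pvSweepB o) :=
  pvExt_sweepB_fold o.keys o (fun _ h => h)

theorem pv_keys_sweepB (o : pvDS) : (pvSweepB o).keys = o.keys :=
  (pvExt_sweepB o).1.symm


-- ---------- A's step/sweep compute the reference step/sweep (plus the changed flag) ----------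
theorem pv_stepA_fst (x y : Int) (st : pvDS × Bool)
    (hnd : st.1.keys.Nodup) (hx : x ∈ st.1.keys) :
    (pvStepA x st y).1 = pvStepB x st.1 y := by
  unfold pvStepA pvStepB
  by_cases hcy : st.1.contains y = true
  · rw [if_pos hcy, if_pos hcy]
    by_cases hemp :
        (PySem.Set.diff (st.1.getD y PySem.Set.empty) (st.1.getD x PySem.Set.empty)).isEmpty = true
    · rw [if_pos hemp]
      have hsub : ∀ a ∈ st.1.getD y PySem.Set.empty, a ∈ st.1.getD x PySem.Set.empty := by
        intro a ha
        by_contra hns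
        have hmem : a ∈ PySem.Set.diff (st.1.getD y PySem.Set.empty) (st.1.getD x PySem.Set.empty) :=
          (PySem.Set.mem_diff _ _ _).mpr ⟨ha, hns⟩
        rw [List.isEmpty_iff] at hemp
        rw [hemp] at hmem
        cases hmem
      rw [pv_union_eq_self _ _ hsub, pv_insert_getD_self st.1 x hnd hx]
    · rw [if_neg hemp]
      show st.1.insert x _ = st.1.insert x _
      rw [pv_union_diff]
  · rw [if_neg hcy, if_neg hcy]

theorem pv_stepA_flag_true (x y : Int) (st : pvDS × Bool) (h : st.2 = true) :
    (pvStepA x st y).2 = true := by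
  unfold pvStepA
  split
  · split
    · exact h
    · rfl
  · exact h

theorem pv_stepA_eq_or_flag (x y : Int) (st : pvDS × Bool) :
    pvStepA x st y = st ∨ (pvStepA x st y).2 = true := by
  unfold pvStepA
  split
  · split
    · exact Or.inl rfl
    · exact Or.inr rfl
  · exact Or.inl rfl

theorem pv_stepA_of_flag_false (x y : Int) (st : pvDS × Bool)
    (h : (pvStepA x st y).2 = false) : pvStepA x st y = st := by
  rcases pv_stepA_eq_or_flag x y st with h1 | h1
  · exact h1
  · rw [h1] at h; cases h

theorem pv_innerA_flag_true (x : Int) (l : List Int) :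
    ∀ st : pvDS × Bool, st.2 = true → (l.foldl (pvStepA x) st).2 = true := by
  induction l with
  | nil => intro st h; exact h
  | cons y l ih => intro st h; exact ih _ (pv_stepA_flag_true x y st h)

theorem pv_innerA_of_flag_false (x : Int) (l : List Int) :
    ∀ st : pvDS × Bool, (l.foldl (pvStepA x) st).2 = false → l.foldl (pvStepA x) st = st := by
  induction l with
  | nil => intro st _; rfl
  | cons y l ih =>
    intro st h
    rw [List.foldl_cons] at h ⊢
    by_cases h2 : (pvStepA x st y).2 = true
    · rw [pv_innerA_flag_true x l _ h2] at h; cases h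
    · have := pv_stepA_of_flag_false x y st (Bool.eq_false_iff.mpr h2)
      rw [this] at h ⊢
      exact ih st h

theorem pv_sweepA_flag_true (xs : List Int) :
    ∀ st : pvDS × Bool, st.2 = true →
      (xs.foldl (fun st x => (st.1.getD x PySem.Set.empty).foldl (pvStepA x) st) st).2 = true := by
  induction xs with
  | nil => intro st h; exact h
  | cons x xs ih => intro st h; exact ih _ (pv_innerA_flag_true x _ st h)

theorem pv_outerA_of_flag_false (xs : List Int) :
    ∀ st : pvDS × Bool,
      (xs.foldl (fun st x => (st.1.getD x PySem.Set.empty).foldl (pvStepA x) st) st).2 = false →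
      xs.foldl (fun st x => (st.1.getD x PySem.Set.empty).foldl (pvStepA x) st) st = st := by
  induction xs with
  | nil => intro st _; rfl
  | cons x xs ih =>
    intro st hf
    rw [List.foldl_cons] at hf ⊢
    by_cases h2 : ((st.1.getD x PySem.Set.empty).foldl (pvStepA x) st).2 = true
    · rw [pv_sweepA_flag_true xs _ h2] at hf; cases hf
    · have := pv_innerA_of_flag_false x (st.1.getD x PySem.Set.empty) st (Bool.eq_false_iff.mpr h2)
      rw [this] at hf ⊢
      exact ih st hf

theorem pv_sweepA_of_flag_false (o : pvDS) (h : (pvSweepA o).2 = false) :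
    pvSweepA o = (o, false) := by
  unfold pvSweepA at *
  exact pv_outerA_of_flag_false o.keys (o, false) h

theorem pv_innerAB (x : Int) (l : List Int) :
    ∀ st : pvDS × Bool, st.1.keys.Nodup → x ∈ st.1.keys →
      (l.foldl (pvStepA x) st).1 = l.foldl (pvStepB x) st.1 := by
  induction l with
  | nil => intro st _ _; rfl
  | cons y l ih =>
    intro st hnd hx
    rw [List.foldl_cons, List.foldl_cons]
    have h1 := pv_stepA_fst x y st hnd hx
    have hkeys : (pvStepB x st.1 y).keys = st.1.keys := pv_keys_stepB x st.1 y hx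
    have := ih (pvStepA x st y) (by rw [h1, hkeys]; exact hnd) (by rw [h1, hkeys]; exact hx)
    rw [this, h1]

theorem pv_sweepAB_fold (xs : List Int) :
    ∀ st : pvDS × Bool, st.1.keys.Nodup → (∀ a ∈ xs, a ∈ st.1.keys) →
      (xs.foldl (fun st x => (st.1.getD x PySem.Set.empty).foldl (pvStepA x) st) st).1
        = xs.foldl (fun o x => (o.getD x PySem.Set.empty).foldl (pvStepB x) o) st.1 := by
  induction xs with
  | nil => intro st _ _; rfl
  | cons x xs ih =>
    intro st hnd hxs
    rw [List.foldl_cons, List.foldl_cons]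
    have hx : x ∈ st.1.keys := hxs x List.mem_cons_self
    have h1 := pv_innerAB x (st.1.getD x PySem.Set.empty) st hnd hx
    have hext : pvExt st.1 ((st.1.getD x PySem.Set.empty).foldl (pvStepB x) st.1) :=
      pvExt_foldl_stepB x _ st.1 hx
    have := ih ((st.1.getD x PySem.Set.empty).foldl (pvStepA x) st)
      (by rw [h1, ← hext.1]; exact hnd)
      (by rw [h1, ← hext.1]; exact fun a ha => hxs a (List.mem_cons_of_mem _ ha))
    rw [this, h1]

theorem pv_sweepAB (o : pvDS) (hnd : o.keys.Nodup) : (pvSweepA o).1 = pvSweepB o :=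
  pv_sweepAB_fold o.keys (o, false) hnd (fun _ h => h)


-- ---------- one sweep absorbs successor sets (lower bound) ----------
theorem pv_innerB_absorb (x : Int) (l : List Int) :
    ∀ o : pvDS, x ∈ o.keys → ∀ y ∈ l, y ∈ o.keys →
      ∀ z ∈ o.getD y PySem.Set.empty, z ∈ (l.foldl (pvStepB x) o).getD x PySem.Set.empty := by
  induction l with
  | nil => intro o _ y hy; cases hy
  | cons a l ih =>
    intro o hx y hy hyk z hz
    rw [List.foldl_cons]
    rcases List.mem_cons.mp hy with hya | hyl
    · subst hya
      have hca : o.contains y = true := (PySem.Dict.contains_iff_mem_keys o y).mpr hyk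
      have hz1 : z ∈ (pvStepB x o y).getD x PySem.Set.empty := by
        unfold pvStepB
        rw [if_pos hca, PySem.Dict.getD_insert_self]
        exact (PySem.Set.mem_union _ _ _).mpr (Or.inr hz)
      have hx1 : x ∈ (pvStepB x o y).keys := (pv_keys_stepB x o y hx) ▸ hx
      exact pvExt_mem (pvExt_foldl_stepB x l _ hx1) hz1
    · have hext := pvExt_stepB x o a hx
      exact ih (pvStepB x o a) (hext.1 ▸ hx) y hyl (hext.1 ▸ hyk) z (pvExt_mem hext hz)

theorem pv_outerB_absorb (xs : List Int) :
    ∀ o : pvDS, (∀ a ∈ xs, a ∈ o.keys) → ∀ x ∈ xs, ∀ y ∈ o.getD x PySem.Set.empty, y ∈ o.keys →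
      ∀ z ∈ o.getD y PySem.Set.empty,
        z ∈ ((xs.foldl (fun o x => (o.getD x PySem.Set.empty).foldl (pvStepB x) o) o).getD x
          PySem.Set.empty) := by
  induction xs with
  | nil => intro o _ x hx; cases hx
  | cons a xs ih =>
    intro o hks x hx y hyx hyk z hz
    rw [List.foldl_cons]
    have ha : a ∈ o.keys := hks a List.mem_cons_self
    have hext := pvExt_foldl_stepB a (o.getD a PySem.Set.empty) o ha
    rcases List.mem_cons.mp hx with hxa | hxs
    · subst hxa
      have hz1 := pv_innerB_absorb x (o.getD x PySem.Set.empty) o ha y hyx hyk z hz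
      exact pvExt_mem
        (pvExt_sweepB_fold xs _ (fun b hb => hext.1 ▸ hks b (List.mem_cons_of_mem _ hb))) hz1
    · exact ih _ (fun b hb => hext.1 ▸ hks b (List.mem_cons_of_mem _ hb)) x hxs y
        (pvExt_mem hext hyx) (hext.1 ▸ hyk) z (pvExt_mem hext hz)

theorem pv_sweepB_absorb (o : pvDS) (x y z : Int) (hx : x ∈ o.keys) (hy : y ∈ o.keys)
    (hyx : y ∈ o.getD x PySem.Set.empty) (hz : z ∈ o.getD y PySem.Set.empty) :
    z ∈ (pvSweepB o).getD x PySem.Set.empty :=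
  pv_outerB_absorb o.keys o (fun _ h => h) x hx y hyx hy z hz

-- ---------- closed states: a sweep is a literal no-op ----------
def pvClosed (s : pvDS) : Prop :=
  ∀ x ∈ s.keys, ∀ y ∈ s.getD x PySem.Set.empty, y ∈ s.keys →
    ∀ z ∈ s.getD y PySem.Set.empty, z ∈ s.getD x PySem.Set.empty

theorem pv_closed_of_sweep_eq {o : pvDS} (h : pvSweepB o = o) : pvClosed o := by
  intro x hx y hyx hyk z hz
  have := pv_sweepB_absorb o x y z hx hyk hyx hz
  rwa [h] at this

theorem pv_stepB_noop {o : pvDS} (x y : Int) (hnd : o.keys.Nodup) (hx : x ∈ o.keys)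
    (hsub : y ∈ o.keys → ∀ z ∈ o.getD y PySem.Set.empty, z ∈ o.getD x PySem.Set.empty) :
    pvStepB x o y = o := by
  unfold pvStepB
  split
  · rename_i hcy
    rw [pv_union_eq_self _ _ (hsub ((PySem.Dict.contains_iff_mem_keys o y).mp hcy))]
    exact pv_insert_getD_self o x hnd hx
  · rfl

theorem pv_innerB_noop {o : pvDS} (x : Int) (l : List Int) (hnd : o.keys.Nodup)
    (hx : x ∈ o.keys) (hcl : pvClosed o) (hl : ∀ y ∈ l, y ∈ o.getD x PySem.Set.empty) :
    l.foldl (pvStepB x) o = o := by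
  induction l with
  | nil => rfl
  | cons y l ih =>
    rw [List.foldl_cons,
      pv_stepB_noop x y hnd hx (fun hyk => hcl x hx y (hl y List.mem_cons_self) hyk)]
    exact ih (fun a ha => hl a (List.mem_cons_of_mem _ ha))

theorem pv_outerB_noop {o : pvDS} (xs : List Int) (hnd : o.keys.Nodup)
    (hcl : pvClosed o) (hxs : ∀ a ∈ xs, a ∈ o.keys) :
    xs.foldl (fun o x => (o.getD x PySem.Set.empty).foldl (pvStepB x) o) o = o := by
  induction xs with
  | nil => rfl
  | cons x xs ih =>
    rw [List.foldl_cons,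
      pv_innerB_noop x (o.getD x PySem.Set.empty) hnd (hxs x List.mem_cons_self) hcl
        (fun _ h => h)]
    exact ih (fun a ha => hxs a (List.mem_cons_of_mem _ ha))

theorem pv_sweepB_noop {o : pvDS} (hcl : pvClosed o) (hnd : o.keys.Nodup) :
    pvSweepB o = o :=
  pv_outerB_noop o.keys hnd hcl (fun _ h => h)

theorem pv_stepA_noop {o : pvDS} (x y : Int) (b : Bool)
    (hsub : o.contains y = true → ∀ z ∈ o.getD y PySem.Set.empty, z ∈ o.getD x PySem.Set.empty) :
    pvStepA x (o, b) y = (o, b) := by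
  unfold pvStepA
  split
  · rename_i hcy
    rw [if_pos]
    rw [List.isEmpty_iff, List.eq_nil_iff_forall_not_mem]
    intro a ha
    have := (PySem.Set.mem_diff _ _ _).mp ha
    exact this.2 (hsub hcy a this.1)
  · rfl

theorem pv_innerA_noop {o : pvDS} (x : Int) (l : List Int) (b : Bool) (hx : x ∈ o.keys)
    (hcl : pvClosed o) (hl : ∀ y ∈ l, y ∈ o.getD x PySem.Set.empty) :
    l.foldl (pvStepA x) (o, b) = (o, b) := by
  induction l with
  | nil => rfl
  | cons y l ih =>
    rw [List.foldl_cons, pv_stepA_noop x y b (fun hcy =>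
      hcl x hx y (hl y List.mem_cons_self) ((PySem.Dict.contains_iff_mem_keys o y).mp hcy))]
    exact ih (fun a ha => hl a (List.mem_cons_of_mem _ ha))

theorem pv_sweepA_noop {o : pvDS} (hcl : pvClosed o) :
    pvSweepA o = (o, false) := by
  unfold pvSweepA
  have H : ∀ xs : List Int, (∀ a ∈ xs, a ∈ o.keys) →
      xs.foldl (fun st x => (st.1.getD x PySem.Set.empty).foldl (pvStepA x) st) (o, false)
        = (o, false) := by
    intro xs
    induction xs with
    | nil => intro _; rfl
    | cons x xs ih =>
      intro hks
      rw [List.foldl_cons]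
      show (xs.foldl _ ((((o : pvDS), false).1.getD x PySem.Set.empty).foldl (pvStepA x)
        ((o, false)))) = _
      rw [pv_innerA_noop x _ false (hks x List.mem_cons_self) hcl (fun _ h => h)]
      exact ih (fun a ha => hks a (List.mem_cons_of_mem _ ha))
  exact H o.keys (fun _ h => h)

-- ---------- iterated sweeps ----------
def pvIter : Nat → pvDS → pvDS
  | 0, o => o
  | n+1, o => pvSweepB (pvIter n o)

theorem pvExt_iter (n : Nat) (o : pvDS) : pvExt o (pvIter n o) := by
  induction n with
  | zero => exact pvExt_refl o
  | succ n ih => exact pvExt_trans ih (pvExt_sweepB _)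

theorem pv_keys_iter (n : Nat) (o : pvDS) : (pvIter n o).keys = o.keys :=
  (pvExt_iter n o).1.symm

theorem pvIter_succ_left (n : Nat) (o : pvDS) : pvIter (n+1) o = pvIter n (pvSweepB o) := by
  induction n with
  | zero => rfl
  | succ n ih => show pvSweepB (pvIter (n+1) o) = _; rw [ih]; rfl

theorem pvIter_fix {o : pvDS} (h : pvSweepB o = o) (n : Nat) : pvIter n o = o := by
  induction n with
  | zero => rfl
  | succ n ih => show pvSweepB (pvIter n o) = o; rw [ih, h]

-- ---------- reachability along the rules ----------
def pvPath (b : pvDS) : Int → List Int → Int → Prop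
  | x, [], z => z ∈ b.getD x PySem.Set.empty
  | x, y :: l, z => y ∈ b.getD x PySem.Set.empty ∧ y ∈ b.keys ∧ pvPath b y l z

def pvReach (b : pvDS) (x z : Int) : Prop := ∃ l, pvPath b x l z

theorem pv_path_keys (b : pvDS) : ∀ (l : List Int) (x z : Int), pvPath b x l z →
    ∀ y ∈ l, y ∈ b.keys := by
  intro l
  induction l with
  | nil => intro x z _ y hy; cases hy
  | cons a l ih =>
    intro x z hp y hy
    rcases List.mem_cons.mp hy with h | h
    · subst h; exact hp.2.1
    · exact ih a z hp.2.2 y h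

theorem pv_path_append (b : pvDS) : ∀ (l : List Int) (x y : Int), pvPath b x l y →
    y ∈ b.keys → ∀ (l' : List Int) (z : Int), pvPath b y l' z → pvPath b x (l ++ y :: l') z := by
  intro l
  induction l with
  | nil => intro x y hp hyk l' z hp'; exact ⟨hp, hyk, hp'⟩
  | cons a l ih =>
    intro x y hp hyk l' z hp'
    exact ⟨hp.1, hp.2.1, ih a y hp.2.2 hyk l' z hp'⟩

theorem pv_path_mid (b : pvDS) : ∀ (l1 : List Int) (x y : Int) (l2 : List Int) (z : Int),
    pvPath b x (l1 ++ y :: l2) z → pvPath b y l2 z := by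
  intro l1
  induction l1 with
  | nil => intro x y l2 z hp; exact hp.2.2
  | cons a l1 ih => intro x y l2 z hp; exact ih a y l2 z hp.2.2

theorem pv_path_replace (b : pvDS) : ∀ (l1 : List Int) (x y : Int) (l2 l3 : List Int) (z : Int),
    pvPath b x (l1 ++ y :: l2) z → pvPath b y l3 z → pvPath b x (l1 ++ y :: l3) z := by
  intro l1
  induction l1 with
  | nil => intro x y l2 l3 z hp hp'; exact ⟨hp.1, hp.2.1, hp'⟩
  | cons a l1 ih => intro x y l2 l3 z hp hp'; exact ⟨hp.1, hp.2.1, ih a y l2 l3 z hp.2.2 hp'⟩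

theorem pv_reach_trans {b : pvDS} {x y z : Int} (h1 : pvReach b x y) (hyk : y ∈ b.keys)
    (h2 : pvReach b y z) : pvReach b x z := by
  obtain ⟨l1, hp1⟩ := h1
  obtain ⟨l2, hp2⟩ := h2
  exact ⟨l1 ++ y :: l2, pv_path_append b l1 x y hp1 hyk l2 z hp2⟩

theorem pv_dup_split : ∀ l : List Int, ¬ l.Nodup →
    ∃ (y : Int) (l1 l2 l3 : List Int), l = l1 ++ y :: (l2 ++ y :: l3) := by
  intro l
  induction l with
  | nil => intro h; exact absurd List.nodup_nil h
  | cons a t ih =>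
    intro h
    by_cases hat : a ∈ t
    · obtain ⟨s, r, hsr⟩ := List.append_of_mem hat
      exact ⟨a, [], s, r, by rw [hsr]; rfl⟩
    · have : ¬ t.Nodup := fun hn => h (List.nodup_cons.mpr ⟨hat, hn⟩)
      obtain ⟨y, l1, l2, l3, hdec⟩ := ih this
      exact ⟨y, a :: l1, l2, l3, by rw [hdec]; rfl⟩

theorem pv_path_shorten (b : pvDS) : ∀ (n : Nat) (l : List Int) (x z : Int), l.length ≤ n →
    pvPath b x l z → x ∈ b.keys → ∃ l', pvPath b x l' z ∧ l'.length + 1 ≤ b.keys.length := by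
  intro n
  induction n with
  | zero =>
    intro l x z hlen hp hx
    have : l = [] := List.eq_nil_of_length_eq_zero (by omega)
    subst this
    exact ⟨[], hp, by simpa using List.length_pos_of_mem hx⟩
  | succ n ih =>
    intro l x z hlen hp hx
    by_cases hnd : (x :: l).Nodup
    · refine ⟨l, hp, ?_⟩
      have hsub : (x :: l) ⊆ b.keys := by
        intro a ha
        rcases List.mem_cons.mp ha with h | h
        · subst h; exact hx
        · exact pv_path_keys b l x z hp a h
      have := (List.Nodup.subperm hnd hsub).length_le
      simpa using this
    · obtain ⟨y, l1, l2, l3, hdec⟩ := pv_dup_split (x :: l) hnd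
      cases l1 with
      | nil =>
        simp only [List.nil_append] at hdec
        have hxy : x = y := (List.cons_eq_cons.mp hdec).1
        have hl : l = l2 ++ y :: l3 := (List.cons_eq_cons.mp hdec).2
        subst hxy
        have hp3 : pvPath b x l3 z := pv_path_mid b l2 x x l3 z (hl ▸ hp)
        exact ih l3 x z (by rw [hl] at hlen; simp at hlen; omega) hp3 hx
      | cons a l1 =>
        have hxa : x = a := (List.cons_eq_cons.mp hdec).1
        have hl : l = l1 ++ y :: (l2 ++ y :: l3) := (List.cons_eq_cons.mp hdec).2
        have hp3 : pvPath b y l3 z :=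
          pv_path_mid b l2 y y l3 z (pv_path_mid b l1 x y (l2 ++ y :: l3) z (hl ▸ hp))
        have hnew : pvPath b x (l1 ++ y :: l3) z :=
          pv_path_replace b l1 x y (l2 ++ y :: l3) l3 z (hl ▸ hp) hp3
        exact ih (l1 ++ y :: l3) x z (by rw [hl] at hlen; simp at hlen ⊢; omega) hnew hx

-- ---------- every element of every state is reachable (upper bound) ----------
def pvGood (b s : pvDS) : Prop :=
  s.keys = b.keys ∧ ∀ x ∈ s.keys, ∀ z ∈ s.getD x PySem.Set.empty, pvReach b x z

theorem pv_good_step {b s : pvDS} (x y : Int) (hg : pvGood b s) (hx : x ∈ s.keys)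
    (hxy : pvReach b x y) : pvGood b (pvStepB x s y) := by
  have hext := pvExt_stepB x s y hx
  refine ⟨hext.1.symm.trans hg.1, ?_⟩
  intro k hk z hz
  have hk' : k ∈ s.keys := hext.1 ▸ hk
  unfold pvStepB at hz
  by_cases hcy : s.contains y = true
  · rw [if_pos hcy] at hz
    rw [PySem.Dict.getD_insert] at hz
    by_cases hkx : k = x
    · rw [if_pos hkx] at hz
      subst hkx
      rcases (PySem.Set.mem_union _ _ _).mp hz with h | h
      · exact hg.2 k hk' z h
      · have hyk : y ∈ s.keys := (PySem.Dict.contains_iff_mem_keys s y).mp hcy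
        exact pv_reach_trans hxy (hg.1 ▸ hyk) (hg.2 y hyk z h)
    · rw [if_neg hkx] at hz
      exact hg.2 k hk' z hz
  · rw [if_neg hcy] at hz
    exact hg.2 k hk' z hz

theorem pv_good_inner {b : pvDS} (x : Int) (l : List Int) :
    ∀ s : pvDS, pvGood b s → x ∈ s.keys → (∀ y ∈ l, pvReach b x y) →
      pvGood b (l.foldl (pvStepB x) s) := by
  induction l with
  | nil => intro s hg _ _; exact hg
  | cons y l ih =>
    intro s hg hx hl
    rw [List.foldl_cons]
    have hg1 := pv_good_step x y hg hx (hl y List.mem_cons_self)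
    have hext := pvExt_stepB x s y hx
    exact ih _ hg1 (hext.1 ▸ hx) (fun a ha => hl a (List.mem_cons_of_mem _ ha))

theorem pv_good_outer {b : pvDS} (xs : List Int) :
    ∀ s : pvDS, pvGood b s → (∀ a ∈ xs, a ∈ s.keys) →
      pvGood b (xs.foldl (fun o x => (o.getD x PySem.Set.empty).foldl (pvStepB x) o) s) := by
  induction xs with
  | nil => intro s hg _; exact hg
  | cons x xs ih =>
    intro s hg hks
    rw [List.foldl_cons]
    have hx : x ∈ s.keys := hks x List.mem_cons_self
    have hg1 := pv_good_inner x (s.getD x PySem.Set.empty) s hg hx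
      (fun y hy => hg.2 x hx y hy)
    have hext := pvExt_foldl_stepB x (s.getD x PySem.Set.empty) s hx
    exact ih _ hg1 (fun a ha => hext.1 ▸ hks a (List.mem_cons_of_mem _ ha))

theorem pv_good_sweep {b s : pvDS} (hg : pvGood b s) : pvGood b (pvSweepB s) :=
  pv_good_outer s.keys s hg (fun _ h => h)

theorem pv_good_iter (b : pvDS) (n : Nat) : pvGood b b → pvGood b (pvIter n b) := by
  intro h
  induction n with
  | zero => exact h
  | succ n ih => exact pv_good_sweep ih

theorem pv_good_init (b : pvDS) : pvGood b b :=
  ⟨rfl, fun _ _ _ hz => ⟨[], hz⟩⟩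

-- ---------- K sweeps reach the closure ----------
theorem pv_iter_lb (s0 : pvDS) : ∀ (n : Nat) (l : List Int) (x z : Int),
    pvPath s0 x l z → l.length ≤ n → x ∈ s0.keys →
      z ∈ (pvIter n s0).getD x PySem.Set.empty := by
  intro n
  induction n with
  | zero =>
    intro l x z hp hlen _
    have : l = [] := List.eq_nil_of_length_eq_zero (by omega)
    subst this
    exact hp
  | succ n ih =>
    intro l x z hp hlen hx
    cases l with
    | nil => exact pvExt_mem (pvExt_iter (n+1) s0) hp
    | cons y l' =>
      have hy : y ∈ (pvIter n s0).getD x PySem.Set.empty :=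
        pvExt_mem (pvExt_iter n s0) hp.1
      have hyk : y ∈ (pvIter n s0).keys := (pv_keys_iter n s0) ▸ hp.2.1
      have hz : z ∈ (pvIter n s0).getD y PySem.Set.empty :=
        ih l' y z hp.2.2 (by simpa using hlen) hp.2.1
      exact pv_sweepB_absorb (pvIter n s0) x y z ((pv_keys_iter n s0) ▸ hx) hyk hy hz

theorem pv_closed_iter_K (s0 : pvDS) : pvClosed (pvIter s0.keys.length s0) := by
  intro x hx y hyx hyk z hz
  have hkeys := pv_keys_iter s0.keys.length s0
  have hx0 : x ∈ s0.keys := hkeys ▸ hx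
  have hyk0 : y ∈ s0.keys := hkeys ▸ hyk
  have hgood := pv_good_iter s0 s0.keys.length (pv_good_init s0)
  have hrxy : pvReach s0 x y := hgood.2 x hx y hyx
  have hryz : pvReach s0 y z := hgood.2 y hyk z hz
  have hrxz : pvReach s0 x z := pv_reach_trans hrxy hyk0 hryz
  obtain ⟨l, hp⟩ := hrxz
  obtain ⟨l', hp', hlen⟩ := pv_path_shorten s0 l.length l x z le_rfl hp hx0
  exact pv_iter_lb s0 s0.keys.length l' x z hp' (by omega) hx0

-- membership in the K-th iterate is exactly reachability
theorem pv_iter_mem_iff (s0 : pvDS) (x z : Int) (hx : x ∈ s0.keys) :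
    z ∈ (pvIter s0.keys.length s0).getD x PySem.Set.empty ↔ pvReach s0 x z := by
  constructor
  · intro hz
    have hgood := pv_good_iter s0 s0.keys.length (pv_good_init s0)
    exact hgood.2 x ((pv_keys_iter s0.keys.length s0).symm ▸ hx) z hz
  · rintro ⟨l, hp⟩
    obtain ⟨l', hp', hlen⟩ := pv_path_shorten s0 l.length l x z le_rfl hp hx
    exact pv_iter_lb s0 s0.keys.length l' x z hp' (by omega) hx

-- ---------- A's loop computes the K-th iterate ----------
theorem pv_loopA_eq : ∀ (n : Nat) (s : pvDS), s.keys.Nodup →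
    pvIter n s = pvIter (n+1) s → pvLoopA (n+1) s = pvIter n s := by
  intro n
  induction n with
  | zero =>
    intro s hnd hfx
    have hfix : pvSweepB s = s := hfx.symm
    show (if (pvSweepA s).2 then pvLoopA 0 (pvSweepA s).1 else (pvSweepA s).1) = s
    rw [pv_sweepA_noop (pv_closed_of_sweep_eq hfix)]
    simp
  | succ n ih =>
    intro s hnd hfx
    show (if (pvSweepA s).2 then pvLoopA (n+1) (pvSweepA s).1 else (pvSweepA s).1) = _
    by_cases hfix : pvSweepB s = s
    · rw [pv_sweepA_noop (pv_closed_of_sweep_eq hfix)]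
      simp only [Bool.false_eq_true, if_false]
      exact (pvIter_fix hfix _).symm
    · have hfl : (pvSweepA s).2 = true := by
        by_contra hflf
        have := pv_sweepA_of_flag_false s (Bool.eq_false_iff.mpr hflf)
        have h1 : (pvSweepA s).1 = s := by rw [this]
        rw [pv_sweepAB s hnd] at h1
        exact hfix h1
      rw [hfl, if_pos rfl, pv_sweepAB s hnd]
      have hnd' : (pvSweepB s).keys.Nodup := (pv_keys_sweepB s) ▸ hnd
      have hfx' : pvIter n (pvSweepB s) = pvIter (n+1) (pvSweepB s) := by
        rw [← pvIter_succ_left, ← pvIter_succ_left]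
        exact hfx
      rw [ih (pvSweepB s) hnd' hfx', pvIter_succ_left]

-- ---------- the two initialisations agree ----------
theorem pv_init_fold : ∀ (l : List (Int × List Int)) (o : pvDS),
    (o.keys ++ l.map (·.1)).Nodup →
      (l.foldl (fun o p =>
          let o' := if o.contains p.1 then o else o.insert p.1 PySem.Set.empty
          o'.insert p.1 (PySem.Set.update (o'.getD p.1 PySem.Set.empty) p.2)) o
        = l.foldl (fun o p => o.insert p.1 (PySem.Set.ofList p.2)) o)
      ∧ (l.foldl (fun o p => o.insert p.1 (PySem.Set.ofList p.2)) o).keys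
          = o.keys ++ l.map (·.1) := by
  intro l
  induction l with
  | nil => intro o _; exact ⟨rfl, by simp⟩
  | cons p l ih =>
    intro o hnd
    have hpk : p.1 ∉ o.keys := by
      rw [List.map_cons] at hnd
      have := List.disjoint_of_nodup_append hnd
      exact fun hmem => this hmem List.mem_cons_self
    have hcp : o.contains p.1 = false := by
      rw [← Bool.not_eq_true, PySem.Dict.contains_iff_mem_keys]; exact hpk
    have hstep : (let o' := if o.contains p.1 then o else o.insert p.1 PySem.Set.empty
        o'.insert p.1 (PySem.Set.update (o'.getD p.1 PySem.Set.empty) p.2))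
        = o.insert p.1 (PySem.Set.ofList p.2) := by
      show (if o.contains p.1 then o else o.insert p.1 PySem.Set.empty).insert p.1 _ = _
      rw [hcp]
      simp only [Bool.false_eq_true, if_false]
      rw [PySem.Dict.getD_insert_self, PySem.Dict.insert_insert_self]
      rfl
    have hkeys1 : (o.insert p.1 (PySem.Set.ofList p.2)).keys = o.keys ++ [p.1] :=
      PySem.Dict.keys_insert_of_not_contains o _ hcp
    have hnd1 : ((o.insert p.1 (PySem.Set.ofList p.2)).keys ++ l.map (·.1)).Nodup := by
      rw [hkeys1, List.append_assoc]
      rw [List.map_cons] at hnd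
      simpa using hnd
    obtain ⟨ih1, ih2⟩ := ih (o.insert p.1 (PySem.Set.ofList p.2)) hnd1
    constructor
    · rw [List.foldl_cons, List.foldl_cons, hstep]
      exact ih1
    · rw [List.foldl_cons, ih2, hkeys1, List.map_cons, List.append_assoc]
      rfl

theorem pv_init_eq (d : PySem.Dict Int (List Int)) (hnd : d.keys.Nodup) :
    pvInitA d = pvInitB d ∧ (pvInitB d).keys = d.keys := by
  have h := pv_init_fold d.items PySem.Dict.empty (by simpa using hnd)
  exact ⟨h.1, by simpa using h.2⟩

theorem pv_initB_items (d : PySem.Dict Int (List Int)) (hnd : d.keys.Nodup) :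
    (pvInitB d).items = d.items.map (fun p => (p.1, PySem.Set.ofList p.2)) := by
  unfold pvInitB
  have := PySem.Dict.items_foldl_insert_fresh (l := d.items) (k := (·.1))
    (v := fun p => PySem.Set.ofList p.2) (d := PySem.Dict.empty)
    (by intro a _; exact PySem.Dict.contains_empty _) (by simpa using hnd)
  simpa using this

theorem pv_initB_getD (d : PySem.Dict Int (List Int)) (hnd : d.keys.Nodup) (k : Int)
    (hk : k ∈ d.keys) :
    (pvInitB d).getD k PySem.Set.empty = PySem.Set.ofList (d.getD k []) := by
  obtain ⟨p, hp, hpk⟩ := List.mem_map.mp (show k ∈ d.items.map (·.1) from hk)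
  have h1 : d.getD k [] = p.2 := by
    rw [← hpk]
    exact PySem.Dict.getD_of_mem_items d (by simpa using hp) hnd []
  have h2 : (k, PySem.Set.ofList p.2) ∈ (pvInitB d).items := by
    rw [pv_initB_items d hnd]
    exact List.mem_map.mpr ⟨p, hp, by rw [hpk]⟩
  have hnd2 : (pvInitB d).keys.Nodup := by rw [(pv_init_eq d hnd).2]; exact hnd
  rw [PySem.Dict.getD_of_mem_items _ h2 hnd2, h1]

-- ---------- all stored sets stay duplicate-free ----------
def pvValsND (o : pvDS) : Prop := ∀ k : Int, (o.getD k PySem.Set.empty).Nodup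

theorem pv_valsND_stepB {o : pvDS} (x y : Int) (h : pvValsND o) : pvValsND (pvStepB x o y) := by
  intro k
  unfold pvStepB
  split
  · rw [PySem.Dict.getD_insert]
    by_cases hk : k = x
    · rw [if_pos hk]
      exact PySem.Set.nodup_update _ _ (h x)
    · rw [if_neg hk]; exact h k
  · exact h k

theorem pv_valsND_inner {o : pvDS} (x : Int) (l : List Int) (h : pvValsND o) :
    pvValsND (l.foldl (pvStepB x) o) := by
  induction l generalizing o with
  | nil => exact h
  | cons y l ih => exact ih (pv_valsND_stepB x y h)

theorem pv_valsND_sweep {o : pvDS} (h : pvValsND o) : pvValsND (pvSweepB o) := by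
  unfold pvSweepB
  have H : ∀ (xs : List Int) (s : pvDS), pvValsND s →
      pvValsND (xs.foldl (fun o x => (o.getD x PySem.Set.empty).foldl (pvStepB x) o) s) := by
    intro xs
    induction xs with
    | nil => intro s hs; exact hs
    | cons x xs ih => intro s hs; exact ih _ (pv_valsND_inner x _ hs)
  exact H o.keys o h

theorem pv_valsND_iter (n : Nat) (o : pvDS) (h : pvValsND o) : pvValsND (pvIter n o) := by
  induction n with
  | zero => exact h
  | succ n ih => exact pv_valsND_sweep ih

theorem pv_valsND_init (d : PySem.Dict Int (List Int)) (hnd : d.keys.Nodup) :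
    pvValsND (pvInitB d) := by
  intro k
  by_cases hk : k ∈ d.keys
  · rw [pv_initB_getD d hnd k hk]
    exact PySem.Set.nodup_ofList _
  · have : (pvInitB d).contains k = false := by
      rw [← Bool.not_eq_true, PySem.Dict.contains_iff_mem_keys, (pv_init_eq d hnd).2]
      exact hk
    rw [PySem.Dict.getD_of_not_contains _ _ this]
    exact List.nodup_nil

-- ---------- BFS facts ----------
theorem pv_mem_add_left (seen : PySem.Set Int) (y a : Int) (ha : a ∈ seen) :
    a ∈ PySem.Set.add seen y := by
  rw [PySem.Set.mem_add]; exact Or.inl ha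

theorem pv_mem_add_self (seen : PySem.Set Int) (y : Int) : y ∈ PySem.Set.add seen y := by
  rw [PySem.Set.mem_add]; exact Or.inr rfl

theorem pvBfs_mem_seen (d : PySem.Dict Int (List Int)) :
    ∀ (frontier : List Int) (seen : PySem.Set Int) (a : Int),
      a ∈ seen → a ∈ pvBfs d frontier seen := by
  intro frontier seen
  fun_induction pvBfs d frontier seen with
  | case1 seen => exact fun a ha => ha
  | case2 y rest seen hs ih => exact fun a ha => ih a ha
  | case3 y rest seen hs hk ih => exact fun a ha => ih a (pv_mem_add_left seen y a ha)
  | case4 y rest seen hs hk ih => exact fun a ha => ih a (pv_mem_add_left seen y a ha)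

theorem pvBfs_mem_frontier (d : PySem.Dict Int (List Int)) :
    ∀ (frontier : List Int) (seen : PySem.Set Int) (a : Int),
      a ∈ frontier → a ∈ pvBfs d frontier seen := by
  intro frontier seen
  fun_induction pvBfs d frontier seen with
  | case1 seen => intro a ha; cases ha
  | case2 y rest seen hs ih =>
    intro a ha
    rcases List.mem_cons.mp ha with h | h
    · subst h
      exact pvBfs_mem_seen d rest seen a (by rw [← PySem.Set.contains_iff]; exact hs)
    · exact ih a h
  | case3 y rest seen hs hk ih =>
    intro a ha
    rcases List.mem_cons.mp ha with h | h
    · subst h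
      exact pvBfs_mem_seen d _ _ a (pv_mem_add_self seen a)
    · exact ih a (List.mem_append_left _ h)
  | case4 y rest seen hs hk ih =>
    intro a ha
    rcases List.mem_cons.mp ha with h | h
    · subst h
      exact pvBfs_mem_seen d _ _ a (pv_mem_add_self seen a)
    · exact ih a h

theorem pvBfs_closed (d : PySem.Dict Int (List Int)) :
    ∀ (frontier : List Int) (seen : PySem.Set Int),
      (∀ y ∈ seen, d.contains y = true → ∀ b ∈ d.getD y [], b ∈ seen ∨ b ∈ frontier) →
      ∀ y ∈ pvBfs d frontier seen, d.contains y = true →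
        ∀ b ∈ d.getD y [], b ∈ pvBfs d frontier seen := by
  intro frontier seen
  fun_induction pvBfs d frontier seen with
  | case1 seen =>
    intro hinv y hy hky b hb
    rcases hinv y hy hky b hb with h | h
    · exact h
    · cases h
  | case2 y rest seen hs ih =>
    refine fun hinv => ih (fun w hw hkw b hb => ?_)
    rcases hinv w hw hkw b hb with h | h
    · exact Or.inl h
    · rcases List.mem_cons.mp h with h2 | h2
      · subst h2
        exact Or.inl (by rw [← PySem.Set.contains_iff]; exact hs)
      · exact Or.inr h2
  | case3 y rest seen hs hk ih =>
    refine fun hinv => ih (fun w hw hkw b hb => ?_)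
    rw [PySem.Set.mem_add] at hw
    rcases hw with hw | hw
    · rcases hinv w hw hkw b hb with h | h
      · exact Or.inl (pv_mem_add_left seen y b h)
      · rcases List.mem_cons.mp h with h2 | h2
        · subst h2
          exact Or.inl (pv_mem_add_self seen b)
        · exact Or.inr (List.mem_append_left _ h2)
    · subst hw
      exact Or.inr (List.mem_append_right _ hb)
  | case4 y rest seen hs hk ih =>
    refine fun hinv => ih (fun w hw hkw b hb => ?_)
    rw [PySem.Set.mem_add] at hw
    rcases hw with hw | hw
    · rcases hinv w hw hkw b hb with h | h
      · exact Or.inl (pv_mem_add_left seen y b h)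
      · rcases List.mem_cons.mp h with h2 | h2
        · subst h2
          exact Or.inl (pv_mem_add_self seen b)
        · exact Or.inr h2
    · subst hw
      exact absurd hkw hk

theorem pvBfs_sound (d : PySem.Dict Int (List Int)) (R : Int → Prop)
    (hcl : ∀ a, R a → d.contains a = true → ∀ b ∈ d.getD a [], R b) :
    ∀ (frontier : List Int) (seen : PySem.Set Int),
      (∀ a ∈ seen, R a) → (∀ a ∈ frontier, R a) →
      ∀ a ∈ pvBfs d frontier seen, R a := by
  intro frontier seen
  fun_induction pvBfs d frontier seen with
  | case1 seen => exact fun hseen _ a ha => hseen a ha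
  | case2 y rest seen hs ih =>
    exact fun hseen hfr => ih hseen (fun a ha => hfr a (List.mem_cons_of_mem _ ha))
  | case3 y rest seen hs hk ih =>
    intro hseen hfr
    have hy : R y := hfr y List.mem_cons_self
    refine ih (fun a ha => ?_) (fun a ha => ?_)
    · rw [PySem.Set.mem_add] at ha
      rcases ha with h | h
      · exact hseen a h
      · subst h; exact hy
    · rcases List.mem_append.mp ha with h | h
      · exact hfr a (List.mem_cons_of_mem _ h)
      · exact hcl y hy hk a h
  | case4 y rest seen hs hk ih =>
    intro hseen hfr
    have hy : R y := hfr y List.mem_cons_self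
    refine ih (fun a ha => ?_) (fun a ha => hfr a (List.mem_cons_of_mem _ ha))
    rw [PySem.Set.mem_add] at ha
    rcases ha with h | h
    · exact hseen a h
    · subst h; exact hy

theorem pvBfs_nodup (d : PySem.Dict Int (List Int)) :
    ∀ (frontier : List Int) (seen : PySem.Set Int), seen.Nodup →
      (pvBfs d frontier seen).Nodup := by
  intro frontier seen
  fun_induction pvBfs d frontier seen with
  | case1 seen => exact fun h => h
  | case2 y rest seen hs ih => exact fun h => ih h
  | case3 y rest seen hs hk ih => exact fun h => ih (PySem.Set.nodup_add _ _ h)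
  | case4 y rest seen hs hk ih => exact fun h => ih (PySem.Set.nodup_add _ _ h)

-- ---------- BFS set = reachable set ----------
theorem pvBfs_empty_inv (d : PySem.Dict Int (List Int)) (frontier : List Int) :
    ∀ y ∈ PySem.Set.empty, d.contains y = true →
      ∀ b ∈ d.getD y [], b ∈ PySem.Set.empty ∨ b ∈ frontier := by
  intro y hy
  cases hy

theorem pvBfs_path (d : PySem.Dict Int (List Int)) (hnd : d.keys.Nodup) (x : Int) :
    ∀ (l : List Int) (y z : Int), y ∈ pvBfs d (d.getD x []) PySem.Set.empty →
      d.contains y = true → pvPath (pvInitB d) y l z →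
      z ∈ pvBfs d (d.getD x []) PySem.Set.empty := by
  intro l
  induction l with
  | nil =>
    intro y z hyS hky hp
    have hykeys : y ∈ d.keys := (PySem.Dict.contains_iff_mem_keys d y).mp hky
    have hp2 : z ∈ (pvInitB d).getD y PySem.Set.empty := hp
    rw [pv_initB_getD d hnd y hykeys] at hp2
    have hz : z ∈ d.getD y [] := (PySem.Set.mem_ofList _ _).mp hp2
    exact pvBfs_closed d _ _ (pvBfs_empty_inv d _) y hyS hky z hz
  | cons w l ih =>
    intro y z hyS hky hp
    obtain ⟨hw1, hw2, hp'⟩ := hp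
    have hykeys : y ∈ d.keys := (PySem.Dict.contains_iff_mem_keys d y).mp hky
    rw [pv_initB_getD d hnd y hykeys] at hw1
    have hw1' : w ∈ d.getD y [] := (PySem.Set.mem_ofList _ _).mp hw1
    have hwS : w ∈ pvBfs d (d.getD x []) PySem.Set.empty :=
      pvBfs_closed d _ _ (pvBfs_empty_inv d _) y hyS hky w hw1'
    have hkw : d.contains w = true := by
      rw [PySem.Dict.contains_iff_mem_keys]
      exact (pv_init_eq d hnd).2 ▸ hw2
    exact ih w z hwS hkw hp'

theorem pvBfs_char (d : PySem.Dict Int (List Int)) (hnd : d.keys.Nodup) (x z : Int)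
    (hx : x ∈ d.keys) :
    z ∈ pvBfs d (d.getD x []) PySem.Set.empty ↔ pvReach (pvInitB d) x z := by
  constructor
  · intro hz
    refine pvBfs_sound d (pvReach (pvInitB d) x) ?_ (d.getD x []) PySem.Set.empty
      (fun a ha => by cases ha) (fun a ha => ?_) z hz
    · intro a hra hka b hb
      have hak : a ∈ d.keys := (PySem.Dict.contains_iff_mem_keys d a).mp hka
      have hb' : b ∈ (pvInitB d).getD a PySem.Set.empty := by
        rw [pv_initB_getD d hnd a hak]
        exact (PySem.Set.mem_ofList _ _).mpr hb
      exact pv_reach_trans hra ((pv_init_eq d hnd).2.symm ▸ hak) ⟨[], hb'⟩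
    · refine ⟨[], ?_⟩
      show a ∈ (pvInitB d).getD x PySem.Set.empty
      rw [pv_initB_getD d hnd x hx]
      exact (PySem.Set.mem_ofList _ _).mpr ha
  · rintro ⟨l, hp⟩
    cases l with
    | nil =>
      have hp' : z ∈ (pvInitB d).getD x PySem.Set.empty := hp
      rw [pv_initB_getD d hnd x hx] at hp'
      exact pvBfs_mem_frontier d _ _ z ((PySem.Set.mem_ofList _ _).mp hp')
    | cons y l' =>
      obtain ⟨hy1, hy2, hp'⟩ := hp
      rw [pv_initB_getD d hnd x hx] at hy1
      have hyS : y ∈ pvBfs d (d.getD x []) PySem.Set.empty :=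
        pvBfs_mem_frontier d _ _ y ((PySem.Set.mem_ofList _ _).mp hy1)
      have hky : d.contains y = true := by
        rw [PySem.Dict.contains_iff_mem_keys]
        exact (pv_init_eq d hnd).2 ▸ hy2
      exact pvBfs_path d hnd x l' y z hyS hky hp'

-- ===== VERDICT (by name: the statement is the Claim_ definition above) =====
theorem pv_ports_eq (rules : List (Int × List Int)) :
    build_order_map rules = build_order_map_alt rules := by
  unfold build_order_map build_order_map_alt
  show pvCanon (pvLoopA ((pvInitA (PySem.Dict.ofList rules)).keys.length + 2)
      (pvInitA (PySem.Dict.ofList rules)))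
    = pvCanon ((PySem.Dict.ofList rules).keys.foldl
      (fun o x => o.insert x (pvBfs (PySem.Dict.ofList rules)
        ((PySem.Dict.ofList rules).getD x []) PySem.Set.empty)) PySem.Dict.empty)
  have hdnd : (PySem.Dict.ofList rules).keys.Nodup := PySem.Dict.nodup_keys_ofList rules
  obtain ⟨hinit, hkeys⟩ := pv_init_eq (PySem.Dict.ofList rules) hdnd
  rw [hinit]
  set d := PySem.Dict.ofList rules with hd
  set s0 := pvInitB d with hs0
  set K := s0.keys.length with hK
  have hnd : s0.keys.Nodup := by rw [hkeys]; exact hdnd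
  have hndK : (pvIter K s0).keys.Nodup := (pv_keys_iter K s0) ▸ hnd
  have hfixK : pvSweepB (pvIter K s0) = pvIter K s0 :=
    pv_sweepB_noop (pv_closed_iter_K s0) hndK
  have hloopA : pvLoopA (K + 2) s0 = pvIter (K + 1) s0 := by
    have : pvIter (K + 1) s0 = pvIter (K + 2) s0 := by
      show pvSweepB (pvIter K s0) = pvSweepB (pvIter (K + 1) s0)
      rw [show pvIter (K+1) s0 = pvSweepB (pvIter K s0) from rfl, hfixK]
      exact hfixK.symm
    exact pv_loopA_eq (K + 1) s0 hnd this
  have hiter1 : pvIter (K + 1) s0 = pvIter K s0 := by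
    show pvSweepB (pvIter K s0) = pvIter K s0
    exact hfixK
  rw [hloopA, hiter1]
  -- items of both sides as maps over d.keys
  have hAitems : (pvIter K s0).items
      = (pvIter K s0).keys.map (fun k => (k, (pvIter K s0).getD k PySem.Set.empty)) :=
    PySem.Dict.items_eq_map_keys _ hndK PySem.Set.empty
  have hBitems : (d.keys.foldl
      (fun o x => o.insert x (pvBfs d (d.getD x []) PySem.Set.empty)) PySem.Dict.empty).items
      = d.keys.map (fun k => (k, pvBfs d (d.getD k []) PySem.Set.empty)) := by
    have := PySem.Dict.items_foldl_insert_fresh (l := d.keys) (k := fun x => x)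
      (v := fun x => pvBfs d (d.getD x []) PySem.Set.empty) (d := PySem.Dict.empty)
      (by intro a _; exact PySem.Dict.contains_empty _) (by simpa using hdnd)
    simpa using this
  unfold pvCanon
  rw [hAitems, hBitems, pv_keys_iter K s0, hkeys, List.map_map, List.map_map]
  apply List.map_congr_left
  intro k hk
  have hks0 : k ∈ s0.keys := by rw [hkeys]; exact hk
  have hndF : ((pvIter K s0).getD k PySem.Set.empty).Nodup :=
    pv_valsND_iter K s0 (pv_valsND_init d hdnd) k
  have hndB : (pvBfs d (d.getD k []) PySem.Set.empty).Nodup :=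
    pvBfs_nodup d _ _ List.nodup_nil
  have hperm : ((pvIter K s0).getD k PySem.Set.empty).Perm
      (pvBfs d (d.getD k []) PySem.Set.empty) := by
    rw [List.perm_ext_iff_of_nodup hndF hndB]
    intro a
    rw [pv_iter_mem_iff s0 k a hks0, pvBfs_char d hdnd k a hk]
  show (k, PySem.List.sorted ((pvIter K s0).getD k PySem.Set.empty) (fun z => z))
      = (k, PySem.List.sorted (pvBfs d (d.getD k []) PySem.Set.empty) (fun z => z))
  rw [PySem.List.sorted_eq_sorted_of_perm _ _ (fun z : Int => z) (fun a b h => h) hperm]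

theorem build_order_map_spec : Claim_equal_build_order_map := by
  intro rules _
  unfold Spec_build_order_map
  exact pv_ports_eq rules
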